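-- pv_equiv track=rewrite | github.com/ruppysuppy/Daily-Coding-Problem-Solutions | Solutions/269.py | get_config_helper
-- ===== SOURCE A (Python) =====
-- from typing import List
--
-- def get_config_helper(dominos: List[str], length: int) -> List[str]:
--     has_been_updated = False
--     updated_dominos = dominos.copy()
--     for i in range(length):
--         if (
--             dominos[i] == "L"
--             and i > 0
--             and dominos[i - 1] == "."
--             and ((i > 1 and dominos[i - 2] != "R") or i <= 1)
--         ):
--             updated_dominos[i - 1] = "L"
--             has_been_updated = True
--         elif (
--             dominos[i] == "R"
--             and i < length - 1
--             and dominos[i + 1] == "."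
--             and ((i < length - 2 and dominos[i + 2] != "L") or i >= length - 2)
--         ):
--             updated_dominos[i + 1] = "R"
--             has_been_updated = True
--     if has_been_updated:
--         return get_config_helper(updated_dominos, length)
--     return dominos
-- ===== SOURCE B (Python) =====
-- from typing import List
--
-- def get_config_helper(dominos: List[str], length: int) -> List[str]:
--     k = max(0, length)
--     prefix = dominos[:k]
--     # left-to-right pass: distance to the nearest "R" pushing through dots (None = no force)
--     rdist = []
--     d = None
--     for c in prefix:
--         if c == "R":
--             d = 0
--         elif c == ".":
--             d = None if d is None else d + 1
--         else:
--             d = None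
--         rdist.append(d)
--     # right-to-left pass: distance to the nearest "L"; resolve each cell at once
--     res = []
--     d = None
--     for c, r in reversed(list(zip(prefix, rdist))):
--         if c == "L":
--             d = 0
--         elif c == ".":
--             d = None if d is None else d + 1
--         else:
--             d = None
--         if c != ".":
--             res.append(c)
--         elif r is None and d is None:
--             res.append(".")
--         elif d is None or (r is not None and r < d):
--             res.append("R")
--         elif r is None or d < r:
--             res.append("L")
--         else:
--             res.append(".")
--     res.reverse()
--     return res + dominos[k:]
-- ===== Notes on version B (the rewrite author's own statement) =====
-- stated objective: alternative
-- what changed: A repeatedly re-scans the whole prefix, advancing every front one cell per recursive round until a fixed point; B computes the final configuration directly in one left-to-right pass (distance to the nearest pushing 'R') and one right-to-left pass (distance to the nearest 'L'), resolving each cell by comparing the two distances.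
import Mathlib
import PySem

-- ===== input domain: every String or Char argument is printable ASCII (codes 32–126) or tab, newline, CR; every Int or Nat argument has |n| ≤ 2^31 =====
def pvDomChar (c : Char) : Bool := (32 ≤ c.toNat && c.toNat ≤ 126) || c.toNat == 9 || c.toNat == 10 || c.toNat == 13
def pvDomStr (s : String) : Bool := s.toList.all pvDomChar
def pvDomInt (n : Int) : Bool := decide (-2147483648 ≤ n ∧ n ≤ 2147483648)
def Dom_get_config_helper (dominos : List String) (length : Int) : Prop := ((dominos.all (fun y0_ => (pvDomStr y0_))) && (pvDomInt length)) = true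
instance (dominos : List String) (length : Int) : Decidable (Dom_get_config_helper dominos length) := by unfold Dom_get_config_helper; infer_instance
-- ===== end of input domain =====

-- B replaces A's until-stable re-simulation rounds by two single force-distance passes
-- (a different algorithm); equal return values proved on Pre_ (length ≤ len(dominos)).

-- ===== PORT A =====
-- one pass of A's "for i in range(length)" loop over a copy, plus the has_been_updated flag
def pvStepA (dominos : List String) (length : Int) : List String × Bool :=
  (PySem.List.pyRange 0 length 1).foldl
    (fun st i =>
      if PySem.List.pyGetD dominos i "" = "L" ∧ 0 < i ∧ PySem.List.pyGetD dominos (i-1) "" = "." ∧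
          ((1 < i ∧ PySem.List.pyGetD dominos (i-2) "" ≠ "R") ∨ i ≤ 1) then
        (PySem.List.pySetD st.1 (i-1) "L", true)
      else if PySem.List.pyGetD dominos i "" = "R" ∧ i < length - 1 ∧ PySem.List.pyGetD dominos (i+1) "" = "." ∧
          ((i < length - 2 ∧ PySem.List.pyGetD dominos (i+2) "" ≠ "L") ∨ length - 2 ≤ i) then
        (PySem.List.pySetD st.1 (i+1) "R", true)
      else st)
    (dominos, false)

-- A's tail recursion; the fuel only makes the recursion total (one unit is consumed per
-- round, andeach round turns at least one "." into a letter, so count "."+1 units suffice)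
def pvLoopA (fuel : Nat) (dominos : List String) (length : Int) : List String :=
  match fuel with
  | 0 => dominos
  | Nat.succ f =>
    let st := pvStepA dominos length
    if st.2 then pvLoopA f st.1 length else dominos

def get_config_helper (dominos : List String) (length : Int) : List String :=
  pvLoopA (dominos.count "." + 1) dominos length

-- ===== PORT B =====
-- Source B's force update: new distance after reading cell c (None = no force reaches)
def pvForce (tgt c : String) (d : Option Int) : Option Int :=
  if c = tgt then some 0 else if c = "." then d.map (· + 1) else none

-- Source B's resolution of one cell from its two force distances (branch chain of Source B)
def pvResolve (c : String) (r l : Option Int) : String :=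
  if c ≠ "." then c
  else match r, l with
    | none, none => "."
    | some _, none => "R"
    | none, some _ => "L"
    | some rv, some lv => if rv < lv then "R" else if lv < rv then "L" else "."

def get_config_helper_alt (dominos : List String) (length : Int) : List String :=
  let k := max 0 length
  let pref := PySem.List.slice dominos none (some k)
  let rdist := (pref.foldl
    (fun (st : List (Option Int) × Option Int) c =>
      let d := pvForce "R" c st.2
      (st.1 ++ [d], d)) ([], none)).1
  let res := ((pref.zip rdist).reverse.foldl
    (fun (st : List String × Option Int) cr =>
      let d := pvForce "L" cr.1 st.2
      (st.1 ++ [pvResolve cr.1 cr.2 d], d)) ([], none)).1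
  res.reverse ++ PySem.List.slice dominos (some k) none

-- ===== PRECONDITION & SPEC =====
-- A raises IndexError exactly when length > len(dominos); those inputs are excluded.
def Pre_get_config_helper (dominos : List String) (length : Int) : Prop :=
  length ≤ (dominos.length : Int)
instance (dominos : List String) (length : Int) : Decidable (Pre_get_config_helper dominos length) := by
  unfold Pre_get_config_helper; infer_instance

def pvWitness_get_config_helper : List String × Int := (["R", ".", ".", "L"], 4)

def Spec_get_config_helper (dominos : List String) (length : Int) (out : List String) : Prop := out = get_config_helper_alt dominos length
instance (dominos : List String) (length : Int) (out : List String) : Decidable (Spec_get_config_helper dominos length out) := by unfold Spec_get_config_helper; infer_instance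

-- ===== CLAIM (what is proved, stated in full; the proofs are below) =====
def Claim_equal_get_config_helper : Prop := ∀ (dominos : List String) (length : Int), Dom_get_config_helper dominos length → Pre_get_config_helper dominos length → Spec_get_config_helper dominos length (get_config_helper dominos length)


-- ===== LEMMAS AND PROOFS =====

-- ----- proof layer: force distances as indexed scans -----
def pvScan (tgt : String) (p : List String) : Nat → Option Int
  | 0 => pvForce tgt (p.getD 0 "") none
  | (i+1) => pvForce tgt (p.getD (i+1) "") (pvScan tgt p i)

def pvOpp (tgt : String) (p : List String) (i : Nat) : Option Int :=
  pvScan tgt p.reverse (p.length - 1 - i)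

def pvNewG (t u : String) (p : List String) (i : Nat) : String :=
  if p.getD i "" = "." ∧ pvScan t p i = some 1 ∧ pvOpp u p i ≠ some 1 then t
  else if p.getD i "" = "." ∧ pvOpp u p i = some 1 ∧ pvScan t p i ≠ some 1 then u
  else p.getD i ""

def pvStepG (t u : String) (p : List String) : List String :=
  (List.range p.length).map (pvNewG t u p)

def pvOutF (p : List String) (i : Nat) : String :=
  pvResolve (p.getD i "") (pvScan "R" p i) (pvOpp "L" p i)

def pvB (p : List String) : List String := (List.range p.length).map (pvOutF p)

-- distance table for one simultaneous round: how the t-directed scan changes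
def pvTab (t : String) (r l : Option Int) (c : String) : Option Int :=
  if c = t then some 0
  else if c ≠ "." then none
  else if r = some 1 ∧ l ≠ some 1 then some 0
  else if l = some 1 ∧ r ≠ some 1 then none
  else if r = some 1 ∧ l = some 1 then some 1
  else r.map (· - 1)

lemma pv_getD_reverse (p : List String) (j : Nat) (h : j < p.length) :
    p.reverse.getD j "" = p.getD (p.length - 1 - j) "" := by
  rw [List.getD_eq_getElem _ _ (by simpa using h), List.getD_eq_getElem _ _ (by omega),
    List.getElem_reverse]

lemma pvScan_nonneg (t : String) (p : List String) :
    ∀ i v, pvScan t p i = some v → 0 ≤ v := by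
  intro i
  induction i with
  | zero =>
    intro v hv
    simp only [pvScan, pvForce] at hv
    split_ifs at hv <;> first | (simp at hv; omega) | simp at hv
  | succ i ih =>
    intro v hv
    simp only [pvScan, pvForce] at hv
    split_ifs at hv
    · simp_all
    · cases hs : pvScan t p i with
      | none => rw [hs] at hv; simp at hv
      | some w => rw [hs] at hv; simp at hv; have := ih w hs; omega

lemma pvScan_zero_iff (t : String) (p : List String) (i : Nat) :
    pvScan t p i = some 0 ↔ p.getD i "" = t := by
  cases i with
  | zero =>
    simp only [pvScan, pvForce]
    split_ifs with h1 h2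
    · simp_all
    · simp_all
    · simp_all
  | succ j =>
    simp only [pvScan, pvForce]
    split_ifs with h1 h2
    · simp_all
    · cases hs : pvScan t p j with
      | none => simp_all
      | some w =>
        have hw := pvScan_nonneg t p j w hs
        simp_all
        omega
    · simp_all

lemma pvScan_dot (t : String) (ht : t ≠ ".") (p : List String) (i : Nat) (h1 : 1 ≤ i)
    (hc : p.getD i "" = ".") : pvScan t p i = (pvScan t p (i-1)).map (· + 1) := by
  obtain ⟨j, rfl⟩ : ∃ j, i = j + 1 := ⟨i - 1, by omega⟩
  show pvForce t (p.getD (j+1) "") (pvScan t p j) = _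
  rw [hc]
  unfold pvForce
  rw [if_neg (Ne.symm ht), if_pos rfl]
  simp only [Nat.add_sub_cancel]

lemma pvScan_dot_zero (t : String) (ht : t ≠ ".") (p : List String)
    (hc : p.getD 0 "" = ".") : pvScan t p 0 = none := by
  show pvForce t (p.getD 0 "") none = none
  rw [hc]; unfold pvForce; simp [Ne.symm ht]

lemma pvScan_one_iff (t : String) (ht : t ≠ ".") (p : List String) (i : Nat)
    (hc : p.getD i "" = ".") :
    pvScan t p i = some 1 ↔ (1 ≤ i ∧ p.getD (i-1) "" = t) := by
  cases i with
  | zero => rw [pvScan_dot_zero t ht p hc]; simp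
  | succ j =>
    rw [pvScan_dot t ht p (j+1) (by omega) hc]
    simp only [Nat.add_sub_cancel]
    cases hs : pvScan t p j with
    | none =>
      simp only [Option.map_none]
      constructor
      · intro h; cases h
      · rintro ⟨-, h⟩
        exact absurd ((pvScan_zero_iff t p j).2 h) (by simp [hs])
    | some w =>
      have hw := pvScan_nonneg t p j w hs
      constructor
      · intro h; simp at h
        have : w = 0 := by omega
        subst this
        exact ⟨by omega, (pvScan_zero_iff t p j).1 hs⟩
      · rintro ⟨-, h⟩
        have : pvScan t p j = some 0 := (pvScan_zero_iff t p j).2 h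
        rw [hs] at this; simp at this; subst this; simp

lemma pvOpp_rec (u : String) (p : List String) (i : Nat) (h1 : 1 ≤ i) (h2 : i < p.length) :
    pvOpp u p (i-1) = pvForce u (p.getD (i-1) "") (pvOpp u p i) := by
  unfold pvOpp
  have e1 : p.length - 1 - (i-1) = (p.length - 1 - i) + 1 := by omega
  rw [e1]
  show pvForce u (p.reverse.getD (p.length - 1 - i + 1) "") _ = _
  rw [pv_getD_reverse p _ (by omega)]
  congr 2
  omega

lemma pvOpp_zero_iff (u : String) (p : List String) (i : Nat) (hi : i < p.length) :
    pvOpp u p i = some 0 ↔ p.getD i "" = u := by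
  unfold pvOpp
  rw [pvScan_zero_iff, pv_getD_reverse p _ (by omega)]
  constructor <;> (intro h; rw [← h]; congr 1; omega)

lemma pvOpp_nonneg (u : String) (p : List String) (i : Nat) (v : Int)
    (hv : pvOpp u p i = some v) : 0 ≤ v := pvScan_nonneg _ _ _ _ hv

lemma pvOpp_last (u : String) (p : List String) (i : Nat) (hi : i + 1 = p.length) :
    pvOpp u p i = pvForce u (p.getD i "") none := by
  unfold pvOpp
  have e1 : p.length - 1 - i = 0 := by omega
  rw [e1]
  show pvForce u (p.reverse.getD 0 "") none = _
  rw [pv_getD_reverse p _ (by omega)]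
  congr 2
  omega

lemma pvOpp_dot_last (u : String) (hu : u ≠ ".") (p : List String) (i : Nat)
    (hi : i + 1 = p.length) (hc : p.getD i "" = ".") : pvOpp u p i = none := by
  rw [pvOpp_last u p i hi, hc]; unfold pvForce; simp [Ne.symm hu]

lemma pvOpp_one_iff (u : String) (hu : u ≠ ".") (p : List String) (i : Nat)
    (hi : i < p.length) (hc : p.getD i "" = ".") :
    pvOpp u p i = some 1 ↔ (i + 1 < p.length ∧ p.getD (i+1) "" = u) := by
  by_cases hlast : i + 1 = p.length
  · rw [pvOpp_dot_last u hu p i hlast hc]; simp; omega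
  · have h2 : i + 1 < p.length := by omega
    have hrec := pvOpp_rec u p (i+1) (by omega) h2
    simp only [Nat.add_sub_cancel] at hrec
    rw [hrec, hc]
    unfold pvForce
    rw [if_neg (Ne.symm hu), if_pos rfl]
    cases hs : pvOpp u p (i+1) with
    | none =>
      simp only [Option.map_none]
      constructor
      · intro h; cases h
      · rintro ⟨-, h⟩
        exact absurd ((pvOpp_zero_iff u p (i+1) h2).2 h) (by simp [hs])
    | some w =>
      have hw := pvOpp_nonneg u p (i+1) w hs
      simp only [Option.map_some]
      constructor
      · intro h; simp at h
        have : w = 0 := by omega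
        subst this
        exact ⟨h2, (pvOpp_zero_iff u p (i+1) h2).1 hs⟩
      · rintro ⟨-, h⟩
        have : pvOpp u p (i+1) = some 0 := (pvOpp_zero_iff u p (i+1) h2).2 h
        rw [hs] at this; simp at this; subst this; simp

@[simp] lemma length_pvStepG (t u : String) (p : List String) :
    (pvStepG t u p).length = p.length := by simp [pvStepG]

lemma getD_pvStepG (t u : String) (p : List String) (i : Nat) (hi : i < p.length) :
    (pvStepG t u p).getD i "" = pvNewG t u p i := by
  unfold pvStepG
  rw [List.getD_eq_getElem _ _ (by simpa using hi)]
  simp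

lemma pvStepG_reverse (t u : String) (p : List String) :
    (pvStepG t u p).reverse = pvStepG u t p.reverse := by
  apply List.ext_getElem (by simp)
  intro j h1 h2
  have hj : j < p.length := by simpa using h2
  have e1 : (pvStepG t u p).reverse[j] = pvNewG t u p (p.length - 1 - j) := by
    rw [List.getElem_reverse]
    simp [pvStepG]
  have e2 : (pvStepG u t p.reverse)[j] = pvNewG u t p.reverse j := by
    simp [pvStepG]
  rw [e1, e2]
  unfold pvNewG pvOpp
  rw [List.reverse_reverse, List.length_reverse,
    pv_getD_reverse p j hj]
  have e3 : p.length - 1 - (p.length - 1 - j) = j := by omega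
  rw [e3]
  set c := p.getD (p.length - 1 - j) "" with hc
  set a := pvScan t p (p.length - 1 - j) with ha
  set b := pvScan u p.reverse j with hb
  by_cases k1 : c = "." ∧ a = some 1 ∧ b ≠ some 1 <;>
    by_cases k2 : c = "." ∧ b = some 1 ∧ a ≠ some 1 <;>
    split_ifs <;> tauto

-- evaluation lemmas for the helpers
lemma pvForce_self (t : String) (d : Option Int) : pvForce t t d = some 0 := by
  unfold pvForce; simp

lemma pvForce_other (t c : String) (h1 : c ≠ t) (h2 : c ≠ ".") (d : Option Int) :
    pvForce t c d = none := by
  unfold pvForce; rw [if_neg h1, if_neg h2]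

lemma pvForce_dot (t : String) (ht : t ≠ ".") (d : Option Int) :
    pvForce t "." d = d.map (· + 1) := by
  unfold pvForce; rw [if_neg (Ne.symm ht), if_pos rfl]

lemma pvScan_of_other (t : String) (p : List String) (i : Nat)
    (h1 : p.getD i "" ≠ t) (h2 : p.getD i "" ≠ ".") : pvScan t p i = none := by
  cases i <;> · show pvForce _ _ _ = none; rw [pvForce_other _ _ h1 h2]

lemma pvScan_some_dot (t : String) (p : List String) (i : Nat) (w : Int)
    (hs : pvScan t p i = some w) (hw : w ≠ 0) : p.getD i "" = "." := by
  by_contra hc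
  by_cases h1 : p.getD i "" = t
  · have := (pvScan_zero_iff t p i).2 h1
    rw [hs] at this; simp at this; exact hw this
  · rw [pvScan_of_other t p i h1 hc] at hs; cases hs

lemma pvNewG_not_dot (t u : String) (p : List String) (i : Nat)
    (h : p.getD i "" ≠ ".") : pvNewG t u p i = p.getD i "" := by
  unfold pvNewG
  rw [if_neg (by tauto), if_neg (by tauto)]

lemma pvNewG_t (t u : String) (p : List String) (i : Nat) (hc : p.getD i "" = ".")
    (h1 : pvScan t p i = some 1) (h2 : pvOpp u p i ≠ some 1) : pvNewG t u p i = t := by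
  unfold pvNewG
  rw [if_pos ⟨hc, h1, h2⟩]

lemma pvNewG_u (t u : String) (p : List String) (i : Nat) (hc : p.getD i "" = ".")
    (h1 : pvOpp u p i = some 1) (h2 : pvScan t p i ≠ some 1) : pvNewG t u p i = u := by
  unfold pvNewG
  rw [if_neg (by tauto), if_pos ⟨hc, h1, h2⟩]

lemma pvNewG_dot (t u : String) (p : List String) (i : Nat) (hc : p.getD i "" = ".")
    (h1 : pvScan t p i = some 1 ↔ pvOpp u p i = some 1) : pvNewG t u p i = "." := by
  unfold pvNewG
  rw [if_neg (by tauto), if_neg (by tauto)]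
  exact hc

lemma pvTab_self (t : String) (r l : Option Int) : pvTab t r l t = some 0 := by
  unfold pvTab; simp

lemma pvTab_other (t c : String) (h1 : c ≠ t) (h2 : c ≠ ".") (r l : Option Int) :
    pvTab t r l c = none := by
  unfold pvTab; rw [if_neg h1, if_pos h2]

lemma pvTab_dot3 (t : String) (ht : t ≠ ".") (r l : Option Int)
    (h1 : r = some 1) (h2 : l ≠ some 1) : pvTab t r l "." = some 0 := by
  unfold pvTab; rw [if_neg (Ne.symm ht), if_neg (by simp), if_pos ⟨h1, h2⟩]

lemma pvTab_dot4 (t : String) (ht : t ≠ ".") (r l : Option Int)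
    (h1 : l = some 1) (h2 : r ≠ some 1) : pvTab t r l "." = none := by
  unfold pvTab; rw [if_neg (Ne.symm ht), if_neg (by simp), if_neg (by tauto), if_pos ⟨h1, h2⟩]

lemma pvTab_dot5 (t : String) (ht : t ≠ ".") (r l : Option Int)
    (h1 : r = some 1) (h2 : l = some 1) : pvTab t r l "." = some 1 := by
  unfold pvTab; rw [if_neg (Ne.symm ht), if_neg (by simp), if_neg (by tauto), if_neg (by tauto),
    if_pos ⟨h1, h2⟩]

lemma pvTab_dot_else (t : String) (ht : t ≠ ".") (r l : Option Int)
    (h1 : r ≠ some 1) (h2 : l ≠ some 1) : pvTab t r l "." = r.map (· - 1) := by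
  unfold pvTab; rw [if_neg (Ne.symm ht), if_neg (by simp), if_neg (by tauto), if_neg (by tauto),
    if_neg (by tauto)]

-- the heart of the equivalence: one simultaneous round transforms the t-directed
-- force scan exactly as pvTab describes
lemma pvScan_step (t u : String) (ht : t ≠ ".") (hu : u ≠ ".") (htu : u ≠ t)
    (p : List String) :
    ∀ i, i < p.length →
      pvScan t (pvStepG t u p) i = pvTab t (pvScan t p i) (pvOpp u p i) (p.getD i "") := by
  intro i
  induction i with
  | zero =>
    intro hi
    have hS : (pvStepG t u p).getD 0 "" = pvNewG t u p 0 := getD_pvStepG t u p 0 hi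
    show pvForce t ((pvStepG t u p).getD 0 "") none = _
    rw [hS]
    by_cases hct : p.getD 0 "" = t
    · rw [pvNewG_not_dot t u p 0 (by rw [hct]; exact ht), hct, pvForce_self, pvTab_self]
    · by_cases hcd : p.getD 0 "" = "."
      · have hr : pvScan t p 0 = none := pvScan_dot_zero t ht p hcd
        by_cases hl : pvOpp u p 0 = some 1
        · rw [pvNewG_u t u p 0 hcd hl (by simp [hr]), pvForce_other t u htu hu, hcd,
            pvTab_dot4 t ht _ _ hl (by simp [hr])]
        · rw [pvNewG_dot t u p 0 hcd (by simp [hr, hl]), pvForce_dot t ht, hcd,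
            pvTab_dot_else t ht _ _ (by simp [hr]) hl, hr]
          simp
      · rw [pvNewG_not_dot t u p 0 hcd, pvForce_other t _ hct hcd, pvTab_other t _ hct hcd]
  | succ i ih =>
    intro hi
    have hin : i < p.length := by omega
    have IH := ih hin
    have hS : (pvStepG t u p).getD (i+1) "" = pvNewG t u p (i+1) := getD_pvStepG t u p (i+1) hi
    have hrec : pvScan t p (i+1) = pvForce t (p.getD (i+1) "") (pvScan t p i) := rfl
    have hlrec : pvOpp u p i = pvForce u (p.getD i "") (pvOpp u p (i+1)) := by
      have := pvOpp_rec u p (i+1) (by omega) hi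
      simpa using this
    show pvForce t ((pvStepG t u p).getD (i+1) "") (pvScan t (pvStepG t u p) i) = _
    rw [hS, IH]
    by_cases hct : p.getD (i+1) "" = t
    · rw [pvNewG_not_dot t u p (i+1) (by rw [hct]; exact ht), hct, pvForce_self, pvTab_self]
    · by_cases hcd : p.getD (i+1) "" = "."
      · have hr1 : pvScan t p (i+1) = (pvScan t p i).map (· + 1) := by
          rw [hrec, hcd, pvForce_dot t ht]
        by_cases hA : pvScan t p (i+1) = some 1 ∧ pvOpp u p (i+1) ≠ some 1
        · -- cell becomes t
          rw [pvNewG_t t u p (i+1) hcd hA.1 hA.2, pvForce_self, hcd,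
            pvTab_dot3 t ht _ _ hA.1 hA.2]
        · by_cases hB : pvOpp u p (i+1) = some 1 ∧ pvScan t p (i+1) ≠ some 1
          · -- cell becomes u
            rw [pvNewG_u t u p (i+1) hcd hB.1 hB.2, pvForce_other t u htu hu, hcd,
              pvTab_dot4 t ht _ _ hB.1 hB.2]
          · -- cell stays "."
            have hiff : pvScan t p (i+1) = some 1 ↔ pvOpp u p (i+1) = some 1 := by tauto
            rw [pvNewG_dot t u p (i+1) hcd hiff, pvForce_dot t ht, hcd]
            by_cases h11 : pvScan t p (i+1) = some 1
            · -- tie: both distances 1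
              have hl1 := hiff.1 h11
              have hr0 : pvScan t p i = some 0 := by
                rw [hr1] at h11
                cases hs : pvScan t p i with
                | none => rw [hs] at h11; cases h11
                | some w => rw [hs] at h11; simp at h11; simp; omega
              have hc0t : p.getD i "" = t := (pvScan_zero_iff t p i).1 hr0
              rw [pvTab_dot5 t ht _ _ h11 hl1, hc0t, pvTab_self]
              simp
            · have hl1 : pvOpp u p (i+1) ≠ some 1 := fun h => h11 (hiff.2 h)
              rw [pvTab_dot_else t ht _ _ h11 hl1]
              cases hs : pvScan t p (i+1) with
              | none =>
                have hr0 : pvScan t p i = none := by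
                  rw [hr1] at hs
                  cases hs2 : pvScan t p i with
                  | none => rfl
                  | some w => rw [hs2] at hs; simp at hs
                have htabnone : pvTab t (pvScan t p i) (pvOpp u p i) (p.getD i "") = none := by
                  by_cases hct0 : p.getD i "" = t
                  · exact absurd ((pvScan_zero_iff t p i).2 hct0) (by simp [hr0])
                  · by_cases hcd0 : p.getD i "" = "."
                    · rw [hcd0]
                      by_cases hl0 : pvOpp u p i = some 1
                      · rw [pvTab_dot4 t ht _ _ hl0 (by simp [hr0])]
                      · rw [pvTab_dot_else t ht _ _ (by simp [hr0]) hl0, hr0]; rfl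
                    · rw [pvTab_other t _ hct0 hcd0]
                rw [htabnone]
                rfl
              | some v =>
                obtain ⟨w, hw0, hweq⟩ : ∃ w, pvScan t p i = some w ∧ w + 1 = v := by
                  rw [hr1] at hs
                  cases hs2 : pvScan t p i with
                  | none => rw [hs2] at hs; cases hs
                  | some w => rw [hs2] at hs; simp at hs; exact ⟨w, rfl, hs⟩
                have hwnn : 0 ≤ w := pvScan_nonneg t p i w hw0
                have hv1 : v ≠ 1 := by intro h; rw [hs] at h11; exact h11 (by rw [h])
                have hwne : w ≠ 0 := by omega
                have hc0d : p.getD i "" = "." := pvScan_some_dot t p i w hw0 hwne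
                have hl0 : pvOpp u p i ≠ some 1 := by
                  intro h
                  rw [hlrec, hc0d, pvForce_dot u hu] at h
                  cases hs3 : pvOpp u p (i+1) with
                  | none => rw [hs3] at h; cases h
                  | some z =>
                    rw [hs3] at h; simp at h
                    have : z = 0 := by omega
                    subst this
                    have : p.getD (i+1) "" = u := (pvOpp_zero_iff u p (i+1) hi).1 hs3
                    rw [hcd] at this; exact hu this.symm
                rw [hc0d]
                by_cases hw1 : w = 1
                · rw [pvTab_dot3 t ht _ _ (by rw [hw0, hw1]) hl0]
                  simp; omega
                · rw [pvTab_dot_else t ht _ _ (by simp [hw0]; omega) hl0, hw0]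
                  simp; omega
      · rw [pvNewG_not_dot t u p (i+1) hcd, pvForce_other t _ hct hcd, pvTab_other t _ hct hcd]

-- the same fact for the opposite-directed scan, by reversal symmetry
lemma pvOpp_step (t u : String) (ht : t ≠ ".") (hu : u ≠ ".") (htu : u ≠ t)
    (p : List String) (i : Nat) (hi : i < p.length) :
    pvOpp u (pvStepG t u p) i = pvTab u (pvOpp u p i) (pvScan t p i) (p.getD i "") := by
  unfold pvOpp
  rw [pvStepG_reverse, length_pvStepG]
  have hlt : p.length - 1 - i < p.reverse.length := by simp; omega
  have := pvScan_step u t hu ht (Ne.symm htu) p.reverse (p.length - 1 - i) hlt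
  rw [this]
  have e1 : pvScan u p.reverse (p.length - 1 - i) = pvOpp u p i := rfl
  have e2 : pvOpp t p.reverse (p.length - 1 - i) = pvScan t p i := by
    unfold pvOpp
    rw [List.reverse_reverse, List.length_reverse]
    congr 1
    omega
  have e3 : p.reverse.getD (p.length - 1 - i) "" = p.getD i "" := by
    rw [pv_getD_reverse p _ (by omega)]
    congr 1
    omega
  rw [e1, e2, e3]

lemma pvResolve_not_dot (c : String) (h : c ≠ ".") (r l : Option Int) : pvResolve c r l = c := by
  unfold pvResolve; rw [if_pos h]

lemma pvResolve_dot_nn : pvResolve "." none none = "." := by unfold pvResolve; simp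
lemma pvResolve_dot_sn (rv : Int) : pvResolve "." (some rv) none = "R" := by unfold pvResolve; simp
lemma pvResolve_dot_ns (lv : Int) : pvResolve "." none (some lv) = "L" := by unfold pvResolve; simp
lemma pvResolve_dot_ss (rv lv : Int) :
    pvResolve "." (some rv) (some lv) = if rv < lv then "R" else if lv < rv then "L" else "." := by
  unfold pvResolve; simp

-- the per-cell resolution is invariant under one round of A's simultaneous update
lemma pvOut_step (p : List String) (i : Nat) (hi : i < p.length) :
    pvOutF (pvStepG "R" "L" p) i = pvOutF p i := by
  have hR : ("R" : String) ≠ "." := by decide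
  have hL : ("L" : String) ≠ "." := by decide
  have hRL : ("L" : String) ≠ "R" := by decide
  have hs := pvScan_step "R" "L" hR hL hRL p i hi
  have ho := pvOpp_step "R" "L" hR hL hRL p i hi
  unfold pvOutF
  rw [getD_pvStepG _ _ _ _ hi, hs, ho]
  by_cases hcd : p.getD i "" = "."
  · have hrz : pvScan "R" p i ≠ some 0 := by
      intro h
      have := (pvScan_zero_iff "R" p i).1 h
      rw [hcd] at this; exact hR this.symm
    have hlz : pvOpp "L" p i ≠ some 0 := by
      intro h
      have := (pvOpp_zero_iff "L" p i hi).1 h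
      rw [hcd] at this; exact hL this.symm
    by_cases hA : pvScan "R" p i = some 1 ∧ pvOpp "L" p i ≠ some 1
    · rw [pvNewG_t "R" "L" p i hcd hA.1 hA.2, pvResolve_not_dot "R" (by decide), hcd, hA.1]
      cases hl : pvOpp "L" p i with
      | none => rw [pvResolve_dot_sn]
      | some lv =>
        have h1 := pvOpp_nonneg "L" p i lv hl
        have h2 : lv ≠ 1 := by intro h; exact hA.2 (by rw [hl, h])
        have h3 : lv ≠ 0 := by intro h; exact hlz (by rw [hl, h])
        rw [pvResolve_dot_ss, if_pos (by omega)]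
    · by_cases hB : pvOpp "L" p i = some 1 ∧ pvScan "R" p i ≠ some 1
      · rw [pvNewG_u "R" "L" p i hcd hB.1 hB.2, pvResolve_not_dot "L" (by decide), hcd, hB.1]
        cases hr : pvScan "R" p i with
        | none => rw [pvResolve_dot_ns]
        | some rv =>
          have h1 := pvScan_nonneg "R" p i rv hr
          have h2 : rv ≠ 1 := by intro h; exact hB.2 (by rw [hr, h])
          have h3 : rv ≠ 0 := by intro h; exact hrz (by rw [hr, h])
          rw [pvResolve_dot_ss, if_neg (by omega), if_pos (by omega)]
      · have hiff : pvScan "R" p i = some 1 ↔ pvOpp "L" p i = some 1 := by tauto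
        rw [pvNewG_dot "R" "L" p i hcd hiff, hcd]
        by_cases h11 : pvScan "R" p i = some 1
        · have hl1 := hiff.1 h11
          rw [pvTab_dot5 "R" hR _ _ h11 (by rw [hl1]), pvTab_dot5 "L" hL _ _ hl1 (by rw [h11]),
            h11, hl1]
        · have hl1 : pvOpp "L" p i ≠ some 1 := fun h => h11 (hiff.2 h)
          rw [pvTab_dot_else "R" hR _ _ h11 hl1, pvTab_dot_else "L" hL _ _ hl1 h11]
          cases hr : pvScan "R" p i with
          | none =>
            cases hl : pvOpp "L" p i with
            | none => simp
            | some lv =>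
              have h1 := pvOpp_nonneg "L" p i lv hl
              simp only [Option.map_none, Option.map_some]
              rw [pvResolve_dot_ns, pvResolve_dot_ns]
          | some rv =>
            have h1 := pvScan_nonneg "R" p i rv hr
            have h2 : rv ≠ 1 := by intro h; exact h11 (by rw [hr, h])
            have h3 : rv ≠ 0 := by intro h; exact hrz (by rw [hr, h])
            cases hl : pvOpp "L" p i with
            | none =>
              simp only [Option.map_none, Option.map_some]
              rw [pvResolve_dot_sn, pvResolve_dot_sn]
            | some lv =>
              have h4 := pvOpp_nonneg "L" p i lv hl
              have h5 : lv ≠ 1 := by intro h; exact hl1 (by rw [hl, h])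
              have h6 : lv ≠ 0 := by intro h; exact hlz (by rw [hl, h])
              simp only [Option.map_some]
              rw [pvResolve_dot_ss, pvResolve_dot_ss]
              by_cases c1 : rv < lv
              · rw [if_pos (by omega), if_pos c1]
              · by_cases c2 : lv < rv
                · rw [if_neg (by omega), if_pos (by omega), if_neg c1, if_pos c2]
                · rw [if_neg (by omega), if_neg (by omega), if_neg c1, if_neg c2]
  · rw [pvNewG_not_dot "R" "L" p i hcd, pvResolve_not_dot _ hcd, pvResolve_not_dot _ hcd]

-- in a stable configuration every finite t-distance at a dot is a tied distance 1
lemma pvStable_scan (t u : String) (ht : t ≠ ".") (hu : u ≠ ".") (_htu : u ≠ t)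
    (p : List String) (hst : ∀ j, j < p.length → pvNewG t u p j = p.getD j "") :
    ∀ i, i < p.length → p.getD i "" = "." → ∀ v, pvScan t p i = some v →
      v = 1 ∧ pvOpp u p i = some 1 := by
  intro i
  induction i with
  | zero =>
    intro hi hcd v hv
    rw [pvScan_dot_zero t ht p hcd] at hv; cases hv
  | succ i ih =>
    intro hi hcd v hv
    rw [pvScan_dot t ht p (i+1) (by omega) hcd] at hv
    simp only [Nat.add_sub_cancel] at hv
    obtain ⟨w, hw, hwv⟩ : ∃ w, pvScan t p i = some w ∧ w + 1 = v := by
      cases hs : pvScan t p i with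
      | none => rw [hs] at hv; cases hv
      | some w => rw [hs] at hv; simp at hv; exact ⟨w, rfl, hv⟩
    have hwnn := pvScan_nonneg t p i w hw
    by_cases hw0 : w = 0
    · -- the t-letter is adjacent: distance 1; stability forces the tie
      have hv1 : v = 1 := by omega
      subst hv1
      by_cases hl : pvOpp u p (i+1) = some 1
      · exact ⟨rfl, hl⟩
      · have := pvNewG_t t u p (i+1) hcd (by
          rw [pvScan_dot t ht p (i+1) (by omega) hcd]
          simp only [Nat.add_sub_cancel]
          rw [hw, hw0]; rfl) hl
        rw [hst (i+1) hi] at this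
        rw [hcd] at this
        exact absurd this.symm ht
    · -- distance ≥ 2 is impossible in a stable configuration
      have hcd0 : p.getD i "" = "." := pvScan_some_dot t p i w hw hw0
      have := ih (by omega) hcd0 w hw
      have hl1 : pvOpp u p i = some 1 := this.2
      have := (pvOpp_one_iff u hu p i (by omega) hcd0).1 hl1
      rw [hcd] at this
      exact absurd this.2.symm hu

lemma pvStable_opp (t u : String) (ht : t ≠ ".") (hu : u ≠ ".") (htu : u ≠ t)
    (p : List String) (hst : ∀ j, j < p.length → pvNewG t u p j = p.getD j "") :
    ∀ i, i < p.length → p.getD i "" = "." → ∀ v, pvOpp u p i = some v →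
      v = 1 ∧ pvScan t p i = some 1 := by
  intro i hi hcd v hv
  have hrev : ∀ j, j < p.reverse.length → pvNewG u t p.reverse j = p.reverse.getD j "" := by
    intro j hj
    have hjr : j < p.length := by simpa using hj
    have e := getD_pvStepG u t p.reverse j (by simpa using hj)
    rw [← pvStepG_reverse] at e
    rw [← e]
    rw [pv_getD_reverse (pvStepG t u p) j (by simpa using hjr),
      length_pvStepG, getD_pvStepG t u p _ (by omega), hst _ (by omega),
      pv_getD_reverse p j hjr]
  have hb : p.length - 1 - i < p.reverse.length := by simp; omega
  have hdot : p.reverse.getD (p.length - 1 - i) "" = "." := by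
    rw [pv_getD_reverse p _ (by omega)]
    have : p.length - 1 - (p.length - 1 - i) = i := by omega
    rw [this]; exact hcd
  have := pvStable_scan u t hu ht (Ne.symm htu) p.reverse hrev (p.length - 1 - i) hb hdot v hv
  refine ⟨this.1, ?_⟩
  have e2 : pvOpp t p.reverse (p.length - 1 - i) = pvScan t p i := by
    unfold pvOpp
    rw [List.reverse_reverse, List.length_reverse]
    congr 1
    omega
  rw [← e2]
  exact this.2

-- in a stable configuration the resolution returns the configuration itself
lemma pvStable_out (p : List String)
    (hst : ∀ j, j < p.length → pvNewG "R" "L" p j = p.getD j "") :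
    ∀ i, i < p.length → pvOutF p i = p.getD i "" := by
  have hR : ("R" : String) ≠ "." := by decide
  have hL : ("L" : String) ≠ "." := by decide
  have hRL : ("L" : String) ≠ "R" := by decide
  intro i hi
  unfold pvOutF
  by_cases hcd : p.getD i "" = "."
  · rw [hcd]
    cases hr : pvScan "R" p i with
    | none =>
      cases hl : pvOpp "L" p i with
      | none => rw [pvResolve_dot_nn]
      | some lv =>
        have := pvStable_opp "R" "L" hR hL hRL p hst i hi hcd lv hl
        rw [this.2] at hr; cases hr
    | some rv =>
      have := pvStable_scan "R" "L" hR hL hRL p hst i hi hcd rv hr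
      rw [this.2, this.1, pvResolve_dot_ss, if_neg (by omega), if_neg (by omega)]
  · rw [pvResolve_not_dot _ hcd]

-- ----- A-side bridge: one fold pass = simultaneous update + flag -----
-- Python's two branch conditions at loop index i, as Bool predicates on Nat indices
def pvLc (d : List String) (i : Nat) : Bool :=
  d.getD i "" == "L" && decide (1 ≤ i) && d.getD (i-1) "" == "." &&
    !(decide (2 ≤ i) && d.getD (i-2) "" == "R")

def pvRc (d : List String) (len : Int) (i : Nat) : Bool :=
  d.getD i "" == "R" && decide ((i:Int) < len - 1) && d.getD (i+1) "" == "." &&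
    !(decide ((i:Int) < len - 2) && d.getD (i+2) "" == "L")

-- the updated copy after the loop has processed indices < m
def pvUpd (d : List String) (len : Int) (m : Nat) : List String :=
  (List.range d.length).map (fun j =>
    if pvLc d (j+1) && decide (j+1 < m) then "L"
    else if decide (1 ≤ j) && pvRc d len (j-1) && decide (j-1 < m) then "R"
    else d.getD j "")

lemma pvLcRc_excl (d : List String) (len : Int) (i : Nat) :
    pvLc d i = true → pvRc d len i = true → False := by
  intro h1 h2
  simp only [pvLc, pvRc, Bool.and_eq_true, beq_iff_eq] at h1 h2
  rw [h1.1.1.1] at h2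
  exact absurd h2.1.1.1 (by decide)

@[simp] lemma length_pvUpd (d : List String) (len : Int) (m : Nat) :
    (pvUpd d len m).length = d.length := by simp [pvUpd]

lemma getElem_pvUpd (d : List String) (len : Int) (m j : Nat) (hj : j < d.length) :
    (pvUpd d len m)[j]'(by simpa using hj) =
      (if pvLc d (j+1) && decide (j+1 < m) then "L"
       else if decide (1 ≤ j) && pvRc d len (j-1) && decide (j-1 < m) then "R"
       else d.getD j "") := by
  simp [pvUpd]

lemma pvUpd_zero (d : List String) (len : Int) : pvUpd d len 0 = d := by
  apply List.ext_getElem (by simp)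
  intro j h1 h2
  rw [getElem_pvUpd d len 0 j h2]
  simp [List.getElem?_eq_getElem h2]

lemma pv_condL_iff (d : List String) (m : Nat) :
    (PySem.List.pyGetD d (m:Int) "" = "L" ∧ 0 < (m:Int) ∧
      PySem.List.pyGetD d ((m:Int)-1) "" = "." ∧
      ((1 < (m:Int) ∧ PySem.List.pyGetD d ((m:Int)-2) "" ≠ "R") ∨ (m:Int) ≤ 1)) ↔
    pvLc d m = true := by
  by_cases hm2 : 2 ≤ m
  · have e0 : PySem.List.pyGetD d (m:Int) "" = d.getD m "" := PySem.List.pyGetD_natCast d m ""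
    have e1 : PySem.List.pyGetD d ((m:Int)-1) "" = d.getD (m-1) "" := by
      rw [show ((m:Int) - 1) = ((m-1 : Nat) : Int) by omega]
      exact PySem.List.pyGetD_natCast d (m-1) ""
    have e2 : PySem.List.pyGetD d ((m:Int)-2) "" = d.getD (m-2) "" := by
      rw [show ((m:Int) - 2) = ((m-2 : Nat) : Int) by omega]
      exact PySem.List.pyGetD_natCast d (m-2) ""
    rw [e0, e1, e2]
    simp only [pvLc, Bool.and_eq_true, beq_iff_eq, Bool.not_eq_true', Bool.and_eq_false_iff,
      decide_eq_true_eq, decide_eq_false_iff_not]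
    constructor
    · rintro ⟨h1, -, h3, h4⟩
      refine ⟨⟨⟨h1, by omega⟩, h3⟩, ?_⟩
      rcases h4 with ⟨-, h4⟩ | h4
      · right; simpa using h4
      · omega
    · rintro ⟨⟨⟨h1, -⟩, h3⟩, h4⟩
      refine ⟨h1, by omega, h3, ?_⟩
      left
      refine ⟨by omega, ?_⟩
      rcases h4 with h4 | h4
      · omega
      · simpa using h4
  · by_cases hm1 : 1 ≤ m
    · have hm : m = 1 := by omega
      subst hm
      have e0 : PySem.List.pyGetD d ((1:Nat):Int) "" = d.getD 1 "" := PySem.List.pyGetD_natCast d 1 ""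
      have e1 : PySem.List.pyGetD d (((1:Nat):Int)-1) "" = d.getD 0 "" := by
        rw [show (((1:Nat):Int) - 1) = ((0 : Nat) : Int) by omega]
        exact PySem.List.pyGetD_natCast d 0 ""
      rw [e0, e1]
      simp only [pvLc, Bool.and_eq_true, beq_iff_eq, Bool.not_eq_true', Bool.and_eq_false_iff,
        decide_eq_true_eq, decide_eq_false_iff_not]
      constructor
      · rintro ⟨h1, -, h3, -⟩
        exact ⟨⟨⟨h1, by omega⟩, h3⟩, by omega⟩
      · rintro ⟨⟨⟨h1, -⟩, h3⟩, -⟩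
        exact ⟨h1, by omega, h3, by omega⟩
    · have hm : m = 0 := by omega
      subst hm
      simp [pvLc]

lemma pv_condR_iff (d : List String) (len : Int) (m : Nat) :
    (PySem.List.pyGetD d (m:Int) "" = "R" ∧ (m:Int) < len - 1 ∧
      PySem.List.pyGetD d ((m:Int)+1) "" = "." ∧
      (((m:Int) < len - 2 ∧ PySem.List.pyGetD d ((m:Int)+2) "" ≠ "L") ∨ len - 2 ≤ (m:Int))) ↔
    pvRc d len m = true := by
  have e0 : PySem.List.pyGetD d (m:Int) "" = d.getD m "" := PySem.List.pyGetD_natCast d m ""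
  have e1 : PySem.List.pyGetD d ((m:Int)+1) "" = d.getD (m+1) "" := by
    rw [show ((m:Int) + 1) = ((m+1 : Nat) : Int) by omega]
    exact PySem.List.pyGetD_natCast d (m+1) ""
  have e2 : PySem.List.pyGetD d ((m:Int)+2) "" = d.getD (m+2) "" := by
    rw [show ((m:Int) + 2) = ((m+2 : Nat) : Int) by omega]
    exact PySem.List.pyGetD_natCast d (m+2) ""
  rw [e0, e1, e2]
  simp only [pvRc, Bool.and_eq_true, beq_iff_eq, Bool.not_eq_true', Bool.and_eq_false_iff,
    decide_eq_true_eq, decide_eq_false_iff_not]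
  constructor
  · rintro ⟨h1, h2, h3, h4⟩
    refine ⟨⟨⟨h1, h2⟩, h3⟩, ?_⟩
    rcases h4 with ⟨-, h4⟩ | h4
    · right; simpa using h4
    · left; omega
  · rintro ⟨⟨⟨h1, h2⟩, h3⟩, h4⟩
    refine ⟨h1, h2, h3, ?_⟩
    rcases h4 with h4 | h4
    · right; omega
    · by_cases h5 : (m:Int) < len - 2
      · left; exact ⟨h5, by simpa using h4⟩
      · right; omega

lemma pvUpd_set_L (d : List String) (len : Int) (m : Nat) (hL : pvLc d m = true) :
    (pvUpd d len m).set (m-1) "L" = pvUpd d len (m+1) := by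
  have hm1 : 1 ≤ m := by
    simp only [pvLc, Bool.and_eq_true, decide_eq_true_eq] at hL
    exact hL.1.1.2
  apply List.ext_getElem (by simp)
  intro j h1 h2
  have hj : j < d.length := by simpa using h2
  rw [List.getElem_set, getElem_pvUpd d len m j hj, getElem_pvUpd d len (m+1) j hj]
  by_cases hje : m - 1 = j
  · subst hje
    rw [if_pos rfl, if_pos (by
      have : (m - 1) + 1 = m := by omega
      rw [this]
      simp [hL])]
  · rw [if_neg hje]
    by_cases hjm : j = m + 1
    · subst hjm
      have hRfalse : pvRc d len m = false := by
        cases h : pvRc d len m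
        · rfl
        · exact absurd (pvLcRc_excl d len m hL h) (by simp)
      have e : m + 1 - 1 = m := by omega
      rw [e, hRfalse]
      simp
      omega
    · have eL : (pvLc d (j+1) && decide (j+1 < m)) = (pvLc d (j+1) && decide (j+1 < m+1)) := by
        cases h : pvLc d (j+1)
        · simp
        · simp only [Bool.true_and]
          have : (j+1 < m) ↔ (j+1 < m+1) := by omega
          simp [this]
      have eR : (decide (1 ≤ j) && pvRc d len (j-1) && decide (j-1 < m)) =
          (decide (1 ≤ j) && pvRc d len (j-1) && decide (j-1 < m+1)) := by
        by_cases hj1 : 1 ≤ j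
        · cases h : pvRc d len (j-1)
          · simp
          · simp only [hj1, decide_true, Bool.true_and, Bool.and_true]
            have : (j-1 < m) ↔ (j-1 < m+1) := by omega
            simp [this]
        · simp [hj1]
      rw [eL, eR]

lemma pvUpd_set_R (d : List String) (len : Int) (m : Nat) (hR : pvRc d len m = true)
    (hL : pvLc d m = false) (_hlen : len ≤ (d.length : Int)) :
    (pvUpd d len m).set (m+1) "R" = pvUpd d len (m+1) := by
  apply List.ext_getElem (by simp)
  intro j h1 h2
  have hj : j < d.length := by simpa using h2
  rw [List.getElem_set, getElem_pvUpd d len m j hj, getElem_pvUpd d len (m+1) j hj]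
  by_cases hje : m + 1 = j
  · subst hje
    have hLfalse : (pvLc d (m+1+1) && decide (m+1+1 < m+1)) = false := by
      simp
    rw [hLfalse, if_pos rfl]
    simp only [Bool.false_eq_true, if_false]
    rw [if_pos (by
      have e : m + 1 - 1 = m := by omega
      rw [e]
      simp only [hR, Bool.and_true, Bool.and_eq_true, decide_eq_true_eq]
      omega)]
  · rw [if_neg hje]
    by_cases hjm : m - 1 = j ∧ 1 ≤ m
    · -- position m-1: its L-clause mentions pvLc d m, which is false
      obtain ⟨hjm, hm1⟩ := hjm
      subst hjm
      have e : (m - 1) + 1 = m := by omega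
      rw [e, hL]
      simp only [Bool.false_and, Bool.false_eq_true, if_false]
      have : (m - 1 - 1 < m) ↔ (m - 1 - 1 < m + 1) := by omega
      simp [this]
    · have eL : (pvLc d (j+1) && decide (j+1 < m)) = (pvLc d (j+1) && decide (j+1 < m+1)) := by
        by_cases hc : j + 1 = m
        · have : m - 1 = j ∧ 1 ≤ m := by omega
          exact absurd this hjm
        · cases h : pvLc d (j+1)
          · simp
          · simp only [Bool.true_and]
            have : (j+1 < m) ↔ (j+1 < m+1) := by omega
            simp [this]
      have eR : (decide (1 ≤ j) && pvRc d len (j-1) && decide (j-1 < m)) =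
          (decide (1 ≤ j) && pvRc d len (j-1) && decide (j-1 < m+1)) := by
        by_cases hj1 : 1 ≤ j
        · by_cases hc : j - 1 = m
          · have : j = m + 1 := by omega
            exact absurd this.symm hje
          · cases h : pvRc d len (j-1)
            · simp
            · simp only [hj1, decide_true, Bool.true_and, Bool.and_true]
              have : (j-1 < m) ↔ (j-1 < m+1) := by omega
              simp [this]
        · simp [hj1]
      rw [eL, eR]

lemma pvUpd_nochange (d : List String) (len : Int) (m : Nat)
    (hL : pvLc d m = false) (hR : pvRc d len m = false) :
    pvUpd d len m = pvUpd d len (m+1) := by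
  apply List.ext_getElem (by simp)
  intro j h1 h2
  have hj : j < d.length := by simpa using h2
  rw [getElem_pvUpd d len m j hj, getElem_pvUpd d len (m+1) j hj]
  have eL : (pvLc d (j+1) && decide (j+1 < m)) = (pvLc d (j+1) && decide (j+1 < m+1)) := by
    by_cases hc : j + 1 = m
    · have hL' : pvLc d (j+1) = false := by rw [hc]; exact hL
      rw [hL']; simp
    · cases h : pvLc d (j+1)
      · simp
      · simp only [Bool.true_and]
        have : (j+1 < m) ↔ (j+1 < m+1) := by omega
        simp [this]
  have eR : (decide (1 ≤ j) && pvRc d len (j-1) && decide (j-1 < m)) =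
      (decide (1 ≤ j) && pvRc d len (j-1) && decide (j-1 < m+1)) := by
    by_cases hj1 : 1 ≤ j
    · by_cases hc : j - 1 = m
      · have hR' : pvRc d len (j-1) = false := by rw [hc]; exact hR
        rw [hR']; simp
      · cases h : pvRc d len (j-1)
        · simp
        · simp only [hj1, decide_true, Bool.true_and, Bool.and_true]
          have : (j-1 < m) ↔ (j-1 < m+1) := by omega
          simp [this]
    · simp [hj1]
  rw [eL, eR]

lemma pvStepA_eq (d : List String) (len : Int) (hlen : len ≤ (d.length : Int)) :
    pvStepA d len = (pvUpd d len len.toNat,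
      (List.range len.toNat).any (fun i => pvLc d i || pvRc d len i)) := by
  have aux : ∀ m : Nat, (m:Int) ≤ len →
      (PySem.List.pyRange 0 (m:Int) 1).foldl
        (fun st i =>
          if PySem.List.pyGetD d i "" = "L" ∧ 0 < i ∧ PySem.List.pyGetD d (i-1) "" = "." ∧
              ((1 < i ∧ PySem.List.pyGetD d (i-2) "" ≠ "R") ∨ i ≤ 1) then
            (PySem.List.pySetD st.1 (i-1) "L", true)
          else if PySem.List.pyGetD d i "" = "R" ∧ i < len - 1 ∧ PySem.List.pyGetD d (i+1) "" = "." ∧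
              ((i < len - 2 ∧ PySem.List.pyGetD d (i+2) "" ≠ "L") ∨ len - 2 ≤ i) then
            (PySem.List.pySetD st.1 (i+1) "R", true)
          else st)
        (d, false) =
      (pvUpd d len m, (List.range m).any (fun i => pvLc d i || pvRc d len i)) := by
    intro m
    induction m with
    | zero =>
      intro _
      rw [show ((0:Nat):Int) = 0 by rfl, PySem.List.pyRange_one_eq_nil (by omega)]
      simp [pvUpd_zero]
    | succ m ih =>
      intro hm
      rw [show ((m+1:Nat):Int) = (m:Int)+1 by push_cast; ring,
        PySem.List.pyRange_one_succ_right (by omega), List.foldl_append,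
        ih (by omega)]
      simp only [List.foldl_cons, List.foldl_nil]
      rw [List.range_succ, List.any_append]
      by_cases hLc : pvLc d m = true
      · rw [if_pos ((pv_condL_iff d m).2 hLc)]
        have hset : PySem.List.pySetD (pvUpd d len m) ((m:Int)-1) "L" =
            (pvUpd d len m).set (m-1) "L" := by
          have hm1 : 1 ≤ m := by
            simp only [pvLc, Bool.and_eq_true, decide_eq_true_eq] at hLc
            exact hLc.1.1.2
          rw [show ((m:Int) - 1) = ((m-1 : Nat) : Int) by omega]
          exact PySem.List.pySetD_natCast _ _ _
        rw [hset, pvUpd_set_L d len m hLc]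
        simp [hLc]
      · have hLc' : pvLc d m = false := by simpa using hLc
        rw [if_neg (fun h => hLc ((pv_condL_iff d m).1 h))]
        by_cases hRc : pvRc d len m = true
        · rw [if_pos ((pv_condR_iff d len m).2 hRc)]
          have hset : PySem.List.pySetD (pvUpd d len m) ((m:Int)+1) "R" =
              (pvUpd d len m).set (m+1) "R" := by
            rw [show ((m:Int) + 1) = ((m+1 : Nat) : Int) by omega]
            exact PySem.List.pySetD_natCast _ _ _
          rw [hset, pvUpd_set_R d len m hRc hLc' hlen]
          simp [hRc]
        · have hRc' : pvRc d len m = false := by simpa using hRc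
          rw [if_neg (fun h => hRc ((pv_condR_iff d len m).1 h))]
          rw [← pvUpd_nochange d len m hLc' hRc']
          simp [hLc', hRc']
  unfold pvStepA
  by_cases h0 : 0 ≤ len
  · have := aux len.toNat (by omega)
    rw [show ((len.toNat : Nat) : Int) = len by omega] at this
    exact this
  · rw [PySem.List.pyRange_one_eq_nil (by omega)]
    have hz : len.toNat = 0 := by omega
    rw [hz]
    simp [pvUpd_zero]

lemma pv_getD_take (d : List String) (k j : Nat) (hj : j < k) (hk : k ≤ d.length) :
    (d.take k).getD j "" = d.getD j "" := by
  rw [List.getD_eq_getElem _ _ (by simp; omega), List.getD_eq_getElem _ _ (by omega)]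
  simp

lemma pv_length_take (d : List String) (k : Nat) (hk : k ≤ d.length) :
    (d.take k).length = k := by simp; omega

lemma pvE1 (d : List String) (len : Int) (hlen : len ≤ (d.length : Int)) (j : Nat)
    (hj : j < len.toNat) :
    (pvLc d (j+1) && decide (j+1 < len.toNat)) = true ↔
    ((d.take len.toNat).getD j "" = "." ∧ pvOpp "L" (d.take len.toNat) j = some 1 ∧
      pvScan "R" (d.take len.toNat) j ≠ some 1) := by
  have hL : ("L" : String) ≠ "." := by decide
  have hR : ("R" : String) ≠ "." := by decide
  have hk : len.toNat ≤ d.length := by omega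
  have hp : (d.take len.toNat).length = len.toNat := pv_length_take d _ hk
  have e1 : (j + 1) - 1 = j := by omega
  have e2 : (j + 1) - 2 = j - 1 := by omega
  simp only [pvLc, Bool.and_eq_true, beq_iff_eq, Bool.not_eq_true', Bool.and_eq_false_iff,
    beq_eq_false_iff_ne, decide_eq_true_eq, decide_eq_false_iff_not, e1, e2]
  constructor
  · rintro ⟨⟨⟨⟨hc1, -⟩, hc3⟩, hc4⟩, hjk⟩
    have hdot : (d.take len.toNat).getD j "" = "." := by
      rw [pv_getD_take d _ j hj hk]; exact hc3
    refine ⟨hdot, ?_, ?_⟩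
    · exact (pvOpp_one_iff "L" hL _ j (by omega) hdot).2
        ⟨by omega, by rw [pv_getD_take d _ (j+1) hjk hk]; exact hc1⟩
    · intro hscan
      obtain ⟨hj1, hprev⟩ := (pvScan_one_iff "R" hR _ j hdot).1 hscan
      rw [pv_getD_take d _ (j-1) (by omega) hk] at hprev
      rcases hc4 with h | h
      · omega
      · exact h hprev
  · rintro ⟨hdot, hopp, hscan⟩
    obtain ⟨hj1p, hnext⟩ := (pvOpp_one_iff "L" hL _ j (by omega) hdot).1 hopp
    rw [hp] at hj1p
    rw [pv_getD_take d _ (j+1) hj1p hk] at hnext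
    refine ⟨⟨⟨⟨hnext, by omega⟩, by rw [← pv_getD_take d _ j hj hk]; exact hdot⟩, ?_⟩, hj1p⟩
    by_cases h2 : 2 ≤ j + 1 ∧ d.getD (j-1) "" = "R"
    · exfalso
      apply hscan
      refine (pvScan_one_iff "R" hR _ j hdot).2 ⟨by omega, ?_⟩
      rw [pv_getD_take d _ (j-1) (by omega) hk]
      exact h2.2
    · by_cases h3 : 2 ≤ j + 1
      · right; intro hr; exact h2 ⟨h3, hr⟩
      · left; omega

lemma pvE2 (d : List String) (len : Int) (hlen : len ≤ (d.length : Int)) (j : Nat)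
    (hj : j < len.toNat) :
    (decide (1 ≤ j) && pvRc d len (j-1) && decide (j-1 < len.toNat)) = true ↔
    ((d.take len.toNat).getD j "" = "." ∧ pvScan "R" (d.take len.toNat) j = some 1 ∧
      pvOpp "L" (d.take len.toNat) j ≠ some 1) := by
  have hL : ("L" : String) ≠ "." := by decide
  have hR : ("R" : String) ≠ "." := by decide
  have hk : len.toNat ≤ d.length := by omega
  have hp : (d.take len.toNat).length = len.toNat := pv_length_take d _ hk
  have hlen0 : (0:Int) ≤ len := by omega
  have hcast : len = (len.toNat : Int) := by omega
  simp only [pvRc, Bool.and_eq_true, beq_iff_eq, Bool.not_eq_true', Bool.and_eq_false_iff,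
    beq_eq_false_iff_ne, decide_eq_true_eq, decide_eq_false_iff_not]
  constructor
  · rintro ⟨⟨hj1, ⟨⟨⟨hc1, hc2⟩, hc3⟩, hc4⟩⟩, -⟩
    have ej : (j - 1) + 1 = j := by omega
    rw [ej] at hc3
    have hdot : (d.take len.toNat).getD j "" = "." := by
      rw [pv_getD_take d _ j hj hk]; exact hc3
    refine ⟨hdot, ?_, ?_⟩
    · exact (pvScan_one_iff "R" hR _ j hdot).2
        ⟨hj1, by rw [pv_getD_take d _ (j-1) (by omega) hk]; exact hc1⟩
    · intro hopp
      obtain ⟨hj1p, hnext⟩ := (pvOpp_one_iff "L" hL _ j (by omega) hdot).1 hopp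
      rw [hp] at hj1p
      rw [pv_getD_take d _ (j+1) hj1p hk] at hnext
      have ej2 : (j - 1) + 2 = j + 1 := by omega
      rw [ej2] at hc4
      rcases hc4 with h | h
      · exact absurd (by omega : ((j-1 : Nat) : Int) < len - 2) h
      · exact h hnext
  · rintro ⟨hdot, hscan, hopp⟩
    obtain ⟨hj1, hprev⟩ := (pvScan_one_iff "R" hR _ j hdot).1 hscan
    rw [pv_getD_take d _ (j-1) (by omega) hk] at hprev
    have ej : (j - 1) + 1 = j := by omega
    have ej2 : (j - 1) + 2 = j + 1 := by omega
    refine ⟨⟨hj1, ⟨⟨⟨hprev, by omega⟩, ?_⟩, ?_⟩⟩, by omega⟩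
    · rw [ej, ← pv_getD_take d _ j hj hk]; exact hdot
    · rw [ej2]
      by_cases hnl : j + 1 < len.toNat
      · right
        intro hcl
        apply hopp
        exact (pvOpp_one_iff "L" hL _ j (by omega) hdot).2
          ⟨by omega, by rw [pv_getD_take d _ (j+1) hnl hk]; exact hcl⟩
      · left; omega

-- the processed configuration after a full pass is the simultaneous update of the prefix
lemma pvUpd_final (d : List String) (len : Int) (hlen : len ≤ (d.length : Int)) :
    pvUpd d len len.toNat = pvStepG "R" "L" (d.take len.toNat) ++ d.drop len.toNat := by
  have hk : len.toNat ≤ d.length := by omega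
  have hp : (d.take len.toNat).length = len.toNat := pv_length_take d _ hk
  apply List.ext_getElem (by simp [hp]; omega)
  intro j h1 h2
  have hj : j < d.length := by simpa using h1
  rw [getElem_pvUpd d len len.toNat j hj]
  by_cases hjk : j < len.toNat
  · rw [List.getElem_append_left (by simp [hp]; omega)]
    have eS : (pvStepG "R" "L" (d.take len.toNat))[j]'(by simp [hp]; omega) =
        pvNewG "R" "L" (d.take len.toNat) j := by
      have := getD_pvStepG "R" "L" (d.take len.toNat) j (by omega)
      rw [List.getD_eq_getElem _ _ (by simp [hp]; omega)] at this
      exact this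
    rw [eS]
    by_cases hA : (d.take len.toNat).getD j "" = "." ∧
        pvScan "R" (d.take len.toNat) j = some 1 ∧ pvOpp "L" (d.take len.toNat) j ≠ some 1
    · have hcL : (pvLc d (j+1) && decide (j+1 < len.toNat)) = false := by
        cases hc : (pvLc d (j+1) && decide (j+1 < len.toNat))
        · rfl
        · obtain ⟨-, hopp, -⟩ := (pvE1 d len hlen j hjk).1 hc
          exact absurd hopp hA.2.2
      have hcR : (decide (1 ≤ j) && pvRc d len (j-1) && decide (j-1 < len.toNat)) = true :=
        (pvE2 d len hlen j hjk).2 hA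
      rw [hcL, hcR]
      simp only [Bool.false_eq_true, if_false, if_true]
      exact (pvNewG_t "R" "L" _ j hA.1 hA.2.1 hA.2.2).symm
    · by_cases hB : (d.take len.toNat).getD j "" = "." ∧
          pvOpp "L" (d.take len.toNat) j = some 1 ∧ pvScan "R" (d.take len.toNat) j ≠ some 1
      · have hcL : (pvLc d (j+1) && decide (j+1 < len.toNat)) = true :=
          (pvE1 d len hlen j hjk).2 hB
        rw [hcL]
        simp only [if_true]
        exact (pvNewG_u "R" "L" _ j hB.1 hB.2.1 hB.2.2).symm
      · have hcL : (pvLc d (j+1) && decide (j+1 < len.toNat)) = false := by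
          cases hc : (pvLc d (j+1) && decide (j+1 < len.toNat))
          · rfl
          · exact absurd ((pvE1 d len hlen j hjk).1 hc) hB
        have hcR : (decide (1 ≤ j) && pvRc d len (j-1) && decide (j-1 < len.toNat)) = false := by
          cases hc : (decide (1 ≤ j) && pvRc d len (j-1) && decide (j-1 < len.toNat))
          · rfl
          · exact absurd ((pvE2 d len hlen j hjk).1 hc) hA
        rw [hcL, hcR]
        simp only [Bool.false_eq_true, if_false]
        have hnew : pvNewG "R" "L" (d.take len.toNat) j = (d.take len.toNat).getD j "" := by
          unfold pvNewG
          rw [if_neg (fun h => hA ⟨h.1, h.2.1, h.2.2⟩), if_neg (fun h => hB ⟨h.1, h.2.1, h.2.2⟩)]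
        rw [hnew, pv_getD_take d _ j hjk hk]
  · rw [List.getElem_append_right (by simp [hp]; omega)]
    have hcL : (pvLc d (j+1) && decide (j+1 < len.toNat)) = false := by
      have : ¬ (j + 1 < len.toNat) := by omega
      simp [this]
    have hcR : (decide (1 ≤ j) && pvRc d len (j-1) && decide (j-1 < len.toNat)) = false := by
      by_cases hj1 : 1 ≤ j
      · cases hc : pvRc d len (j-1)
        · simp
        · exfalso
          simp only [pvRc, Bool.and_eq_true, beq_iff_eq, decide_eq_true_eq] at hc
          have := hc.1.1.2
          omega
      · simp [hj1]
    rw [hcL, hcR]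
    simp only [Bool.false_eq_true, if_false]
    rw [List.getD_eq_getElem _ _ hj, List.getElem_drop]
    congr 1
    simp [hp]
    omega

-- the configurations (within the prefix) on which a pass changes something
def pvChg (p : List String) : Prop :=
  ∃ j, j < p.length ∧ p.getD j "" = "." ∧
    ((pvScan "R" p j = some 1 ∧ pvOpp "L" p j ≠ some 1) ∨
     (pvOpp "L" p j = some 1 ∧ pvScan "R" p j ≠ some 1))

lemma pv_flag_iff (d : List String) (len : Int) (hlen : len ≤ (d.length : Int)) :
    ((List.range len.toNat).any (fun i => pvLc d i || pvRc d len i)) = true ↔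
    pvChg (d.take len.toNat) := by
  have hk : len.toNat ≤ d.length := by omega
  have hp : (d.take len.toNat).length = len.toNat := pv_length_take d _ hk
  rw [List.any_eq_true]
  constructor
  · rintro ⟨i, hi, hcond⟩
    rw [List.mem_range] at hi
    rcases Bool.or_eq_true_iff.1 hcond with h | h
    · have hi1 : 1 ≤ i := by
        simp only [pvLc, Bool.and_eq_true, decide_eq_true_eq] at h
        exact h.1.1.2
      have hji : i - 1 < len.toNat := by omega
      have : (pvLc d ((i-1)+1) && decide ((i-1)+1 < len.toNat)) = true := by
        have e : (i - 1) + 1 = i := by omega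
        rw [e]
        simp [h, hi]
      obtain ⟨hdot, hopp, hscan⟩ := (pvE1 d len hlen (i-1) hji).1 this
      exact ⟨i-1, by omega, hdot, Or.inr ⟨hopp, hscan⟩⟩
    · have hilen : (i:Int) < len - 1 := by
        simp only [pvRc, Bool.and_eq_true, decide_eq_true_eq] at h
        exact h.1.1.2
      have hji : i + 1 < len.toNat := by omega
      have : (decide (1 ≤ i+1) && pvRc d len ((i+1)-1) && decide ((i+1)-1 < len.toNat)) = true := by
        have e : (i + 1) - 1 = i := by omega
        have hik : i < len.toNat := by omega
        rw [e]
        simp [h, hik]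
      obtain ⟨hdot, hscan, hopp⟩ := (pvE2 d len hlen (i+1) hji).1 this
      exact ⟨i+1, by omega, hdot, Or.inl ⟨hscan, hopp⟩⟩
  · rintro ⟨j, hjp, hdot, hcase⟩
    have hjk : j < len.toNat := by omega
    rcases hcase with ⟨hscan, hopp⟩ | ⟨hopp, hscan⟩
    · have := (pvE2 d len hlen j hjk).2 ⟨hdot, hscan, hopp⟩
      simp only [Bool.and_eq_true, decide_eq_true_eq] at this
      exact ⟨j - 1, List.mem_range.2 (by omega), by simp [this.1.2]⟩
    · have := (pvE1 d len hlen j hjk).2 ⟨hdot, hopp, hscan⟩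
      simp only [Bool.and_eq_true, decide_eq_true_eq] at this
      exact ⟨j + 1, List.mem_range.2 (by omega), by simp [this.1]⟩

lemma pv_nochg_stable (p : List String) (h : ¬ pvChg p) :
    ∀ j, j < p.length → pvNewG "R" "L" p j = p.getD j "" := by
  intro j hj
  unfold pvNewG
  rw [if_neg (fun hc => h ⟨j, hj, hc.1, Or.inl ⟨hc.2.1, hc.2.2⟩⟩),
    if_neg (fun hc => h ⟨j, hj, hc.1, Or.inr ⟨hc.2.1, hc.2.2⟩⟩)]

-- ----- counting dots: a pass strictly reduces them when something changed -----
lemma pv_count_le : ∀ (a b : List String), b.length = a.length →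
    (∀ j, j < a.length → b.getD j "" = a.getD j "" ∨ (a.getD j "" = "." ∧ b.getD j "" ≠ ".")) →
    b.count "." ≤ a.count "." := by
  intro a
  induction a with
  | nil =>
    intro b hl _
    rw [List.length_nil, List.length_eq_zero_iff] at hl
    rw [hl]
  | cons x a ih =>
    intro b hl hpt
    cases b with
    | nil => simp at hl
    | cons y b =>
      simp only [List.length_cons, Nat.add_right_cancel_iff] at hl
      have htail := ih b hl (fun j hj => by
        have := hpt (j+1) (by simp; omega)
        simpa [List.getD_cons_succ] using this)
      have hhead := hpt 0 (by simp)
      simp only [List.getD_cons_zero] at hhead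
      rw [List.count_cons, List.count_cons]
      rcases hhead with h | h
      · rw [h]; cases (x == ".") <;> simp <;> omega
      · rw [h.1]
        have hy : (y == ".") = false := by simpa using h.2
        simp [hy]
        omega

lemma pv_count_lt : ∀ (a b : List String), b.length = a.length →
    (∀ j, j < a.length → b.getD j "" = a.getD j "" ∨ (a.getD j "" = "." ∧ b.getD j "" ≠ ".")) →
    (∃ j, j < a.length ∧ a.getD j "" = "." ∧ b.getD j "" ≠ ".") →
    b.count "." < a.count "." := by
  intro a
  induction a with
  | nil =>
    rintro b - - ⟨j, hj, -⟩
    simp at hj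
  | cons x a ih =>
    rintro b hl hpt ⟨j, hj, hdot, hne⟩
    cases b with
    | nil => simp at hl
    | cons y b =>
      simp only [List.length_cons, Nat.add_right_cancel_iff] at hl
      have hpt' : ∀ j, j < a.length → b.getD j "" = a.getD j "" ∨
          (a.getD j "" = "." ∧ b.getD j "" ≠ ".") := fun j hj => by
        have := hpt (j+1) (by simp; omega)
        simpa [List.getD_cons_succ] using this
      have hhead := hpt 0 (by simp)
      simp only [List.getD_cons_zero] at hhead
      rw [List.count_cons, List.count_cons]
      cases j with
      | zero =>
        simp only [List.getD_cons_zero] at hdot hne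
        have htail := pv_count_le a b hl hpt'
        have hy : (y == ".") = false := by simpa using hne
        rw [hdot]
        simp [hy]
        omega
      | succ j =>
        simp only [List.getD_cons_succ] at hdot hne
        have htail := ih b hl hpt' ⟨j, by simp at hj; omega, hdot, hne⟩
        rcases hhead with h | h
        · rw [h]; cases (x == ".") <;> simp <;> omega
        · rw [h.1]
          have hy : (y == ".") = false := by simpa using h.2
          simp [hy]
          omega

-- ----- the resolved output list -----
@[simp] lemma length_pvB (p : List String) : (pvB p).length = p.length := by simp [pvB]

lemma getElem_pvB (p : List String) (i : Nat) (hi : i < p.length) :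
    (pvB p)[i]'(by simpa using hi) = pvOutF p i := by simp [pvB]

lemma pvB_step (p : List String) : pvB (pvStepG "R" "L" p) = pvB p := by
  apply List.ext_getElem (by simp)
  intro j h1 h2
  have hj : j < p.length := by simpa using h2
  rw [getElem_pvB _ _ (by simpa using h1), getElem_pvB _ _ hj]
  exact pvOut_step p j hj

lemma pvB_stable (p : List String)
    (hst : ∀ j, j < p.length → pvNewG "R" "L" p j = p.getD j "") : pvB p = p := by
  apply List.ext_getElem (by simp)
  intro j h1 h2
  rw [getElem_pvB _ _ h2, pvStable_out p hst j h2, List.getD_eq_getElem _ _ h2]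

-- ----- generic getD facts -----
lemma pv_getD_rev {α : Type} (l : List α) (j : Nat) (h : j < l.length) (dflt : α) :
    l.reverse.getD j dflt = l.getD (l.length - 1 - j) dflt := by
  rw [List.getD_eq_getElem _ _ (by simpa using h), List.getD_eq_getElem _ _ (by omega),
    List.getElem_reverse]

lemma pv_getD_concat {α : Type} (l : List α) (x dflt : α) :
    (l ++ [x]).getD l.length dflt = x := by
  rw [List.getD_eq_getElem _ _ (by simp)]
  rw [List.getElem_append_right (by omega)]
  simp

lemma pv_getD_range_map {α : Type} (n j : Nat) (f : Nat → α) (dflt : α) (hj : j < n) :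
    ((List.range n).map f).getD j dflt = f j := by
  rw [List.getD_eq_getElem _ _ (by simpa using hj)]
  simp

lemma pv_rev_range_map {α : Type} (n : Nat) (f : Nat → α) :
    ((List.range n).map f).reverse = (List.range n).map (fun j => f (n - 1 - j)) := by
  apply List.ext_getElem (by simp)
  intro j h1 h2
  rw [List.getElem_reverse]
  simp

lemma pv_zip_reverse {α β : Type} (l : List α) (m : List β) (h : l.length = m.length) :
    (l.zip m).reverse = l.reverse.zip m.reverse := by
  apply List.ext_getElem (by simp)
  intro i h1 h2
  rw [List.getElem_reverse, List.getElem_zip, List.getElem_zip, List.getElem_reverse,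
    List.getElem_reverse]
  congr 2 <;> simp [h]

-- ----- B-side bridge: the two folds compute the scans -----
lemma pvScan_concat (t : String) (q : List String) (x : String) :
    ∀ i, i < q.length → pvScan t (q ++ [x]) i = pvScan t q i := by
  intro i
  induction i with
  | zero =>
    intro hi
    show pvForce t ((q ++ [x]).getD 0 "") none = pvForce t (q.getD 0 "") none
    rw [List.getD_append _ _ _ _ hi]
  | succ i ih =>
    intro hi
    show pvForce t ((q ++ [x]).getD (i+1) "") (pvScan t (q ++ [x]) i) = _
    rw [List.getD_append _ _ _ _ hi, ih (by omega)]
    rfl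

lemma pvScan_concat_last (t : String) (q : List String) (x : String) :
    pvScan t (q ++ [x]) q.length =
      pvForce t x (if q.length = 0 then none else pvScan t q (q.length - 1)) := by
  cases hq : q with
  | nil => simp [pvScan]
  | cons z q' =>
    subst hq
    have hlen : (z :: q').length = q'.length + 1 := by simp
    rw [hlen]
    show pvForce t (((z :: q') ++ [x]).getD (q'.length + 1) "") (pvScan t ((z :: q') ++ [x]) q'.length) = _
    rw [show ((z :: q') ++ [x]).getD (q'.length + 1) "" = x from by
        have : (z :: q').length = q'.length + 1 := by simp
        rw [← this, pv_getD_concat],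
      pvScan_concat t (z :: q') x q'.length (by simp)]
    simp

lemma pv_fold1 (t : String) : ∀ (q : List String),
    q.foldl (fun (st : List (Option Int) × Option Int) c =>
        let dd := pvForce t c st.2
        (st.1 ++ [dd], dd)) ([], none) =
      ((List.range q.length).map (fun i => pvScan t q i),
       if q.length = 0 then none else pvScan t q (q.length - 1)) := by
  intro q
  induction q using List.reverseRecOn with
  | nil => simp
  | append_singleton q x ih =>
    rw [List.foldl_append, ih]
    simp only [List.foldl_cons, List.foldl_nil]
    have h2 : pvScan t (q ++ [x]) q.length =
        pvForce t x (if q.length = 0 then none else pvScan t q (q.length - 1)) :=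
      pvScan_concat_last t q x
    have c1 : (List.range (q ++ [x]).length).map (fun i => pvScan t (q ++ [x]) i) =
        (List.range q.length).map (fun i => pvScan t q i) ++
          [pvForce t x (if q.length = 0 then none else pvScan t q (q.length - 1))] := by
      rw [List.length_append, List.length_singleton, List.range_succ, List.map_append,
        List.map_singleton, h2]
      congr 1
      exact List.map_congr_left (fun i hi => pvScan_concat t q x i (List.mem_range.1 hi))
    refine Prod.ext ?_ ?_
    · dsimp only
      rw [c1]
    · dsimp only
      rw [List.length_append, List.length_singleton]
      simp only [Nat.add_sub_cancel, Nat.succ_ne_zero, if_false]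
      rw [h2]

lemma pv_fold2 : ∀ (l : List (String × Option Int)),
    l.foldl (fun (st : List String × Option Int) cr =>
        let dd := pvForce "L" cr.1 st.2
        (st.1 ++ [pvResolve cr.1 cr.2 dd], dd)) ([], none) =
      ((List.range l.length).map (fun j =>
          pvResolve ((l.map Prod.fst).getD j "") ((l.map Prod.snd).getD j none)
            (pvScan "L" (l.map Prod.fst) j)),
       if l.length = 0 then none else pvScan "L" (l.map Prod.fst) (l.length - 1)) := by
  intro l
  induction l using List.reverseRecOn with
  | nil => simp
  | append_singleton l x ih =>
    rw [List.foldl_append, ih]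
    simp only [List.foldl_cons, List.foldl_nil]
    have hfst : (l ++ [x]).map Prod.fst = l.map Prod.fst ++ [x.1] := by simp
    have hsnd : (l ++ [x]).map Prod.snd = l.map Prod.snd ++ [x.2] := by simp
    have hflen : (l.map Prod.fst).length = l.length := by simp
    have hlast : pvScan "L" ((l ++ [x]).map Prod.fst) l.length =
        pvForce "L" x.1 (if l.length = 0 then none
          else pvScan "L" (l.map Prod.fst) (l.length - 1)) := by
      rw [hfst]
      have := pvScan_concat_last "L" (l.map Prod.fst) x.1
      rw [hflen] at this
      exact this
    have c1 : (List.range (l ++ [x]).length).map (fun j =>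
        pvResolve (((l ++ [x]).map Prod.fst).getD j "") (((l ++ [x]).map Prod.snd).getD j none)
          (pvScan "L" ((l ++ [x]).map Prod.fst) j)) =
        (List.range l.length).map (fun j =>
          pvResolve ((l.map Prod.fst).getD j "") ((l.map Prod.snd).getD j none)
            (pvScan "L" (l.map Prod.fst) j)) ++
        [pvResolve x.1 x.2 (pvForce "L" x.1 (if l.length = 0 then none
          else pvScan "L" (l.map Prod.fst) (l.length - 1)))] := by
      rw [List.length_append, List.length_singleton, List.range_succ, List.map_append,
        List.map_singleton]
      congr 1
      · refine List.map_congr_left (fun j hj => ?_)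
        rw [List.mem_range] at hj
        rw [hfst, hsnd, List.getD_append _ _ _ _ (by simpa [hflen] using hj),
          List.getD_append _ _ _ _ (by simpa using hj)]
        have := pvScan_concat "L" (l.map Prod.fst) x.1 j (by simpa [hflen] using hj)
        rw [this]
      · rw [hlast, hfst, hsnd]
        have e1 : (l.map Prod.fst ++ [x.1]).getD l.length "" = x.1 := by
          rw [← hflen, pv_getD_concat]
        have e2 : (l.map Prod.snd ++ [x.2]).getD l.length none = x.2 := by
          rw [show l.length = (l.map Prod.snd).length from by simp, pv_getD_concat]
        rw [e1, e2]
    refine Prod.ext ?_ ?_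
    · dsimp only
      rw [c1]
    · dsimp only
      rw [List.length_append, List.length_singleton]
      simp only [Nat.add_sub_cancel, Nat.succ_ne_zero, if_false]
      rw [hlast]

-- the alternative implementation computes the prefix resolution plus the untouched suffix
lemma pvAlt_eq (d : List String) (len : Int) (hlen : len ≤ (d.length : Int)) :
    get_config_helper_alt d len = pvB (d.take len.toNat) ++ d.drop len.toNat := by
  have hk : len.toNat ≤ d.length := by omega
  have hp : (d.take len.toNat).length = len.toNat := pv_length_take d _ hk
  unfold get_config_helper_alt
  dsimp only
  rw [show max 0 len = ((len.toNat : Nat) : Int) from by omega]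
  rw [PySem.List.slice_to_natCast, PySem.List.slice_from_natCast]
  set k := len.toNat with hkdef
  set p := d.take k with hpdef
  rw [pv_fold1 "R"]
  set n := p.length with hndef
  set rdist := (List.range n).map (fun i => pvScan "R" p i) with hrdef
  have hrlen : rdist.length = n := by simp [hrdef]
  have hzrev : (p.zip rdist).reverse = p.reverse.zip rdist.reverse :=
    pv_zip_reverse p rdist (by omega)
  rw [hzrev, pv_fold2]
  have hfst : (p.reverse.zip rdist.reverse).map Prod.fst = p.reverse :=
    List.map_fst_zip (by simp [hrlen]; omega)
  have hsnd : (p.reverse.zip rdist.reverse).map Prod.snd = rdist.reverse :=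
    List.map_snd_zip (by simp [hrlen]; omega)
  have hzlen : (p.reverse.zip rdist.reverse).length = n := by simp [hrlen]; omega
  congr 1
  rw [hzlen, hfst, hsnd, pv_rev_range_map]
  apply List.map_congr_left
  intro i hi
  rw [List.mem_range] at hi
  have e1 : p.reverse.getD (n - 1 - i) "" = p.getD i "" := by
    rw [pv_getD_rev p _ (by omega) ""]
    congr 1
    omega
  have e2 : rdist.reverse.getD (n - 1 - i) none = pvScan "R" p i := by
    rw [pv_getD_rev rdist _ (by omega) none, hrlen, pv_getD_range_map n _ _ _ (by omega)]
    congr 1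
    omega
  have e3 : pvScan "L" p.reverse (n - 1 - i) = pvOpp "L" p i := rfl
  rw [e1, e2, e3]
  rfl

-- ----- the main induction: A's until-stable recursion equals the resolved output -----
lemma pvMain : ∀ (fuel : Nat) (d : List String) (len : Int), d.count "." < fuel →
    len ≤ (d.length : Int) →
    pvLoopA fuel d len = pvB (d.take len.toNat) ++ d.drop len.toNat := by
  intro fuel
  induction fuel with
  | zero => intro d len h _; omega
  | succ f ih =>
    intro d len hcount hlen
    have hk : len.toNat ≤ d.length := by omega
    have hp : (d.take len.toNat).length = len.toNat := pv_length_take d _ hk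
    show (if (pvStepA d len).2 then pvLoopA f (pvStepA d len).1 len else d) = _
    rw [pvStepA_eq d len hlen]
    by_cases hflag : ((List.range len.toNat).any (fun i => pvLc d i || pvRc d len i)) = true
    · rw [if_pos hflag]
      have hchg := (pv_flag_iff d len hlen).1 hflag
      show pvLoopA f (pvUpd d len len.toNat) len = _
      rw [pvUpd_final d len hlen]
      set p := d.take len.toNat with hpdef
      set s := d.drop len.toNat with hsdef
      set b := pvStepG "R" "L" p ++ s with hbdef
      have hblen : b.length = d.length := by
        rw [hbdef]
        simp [hp, hsdef]
        omega
      have hgb : ∀ j, j < len.toNat → b.getD j "" = pvNewG "R" "L" p j := by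
        intro j hj
        rw [hbdef, List.getD_append _ _ _ _ (by simp [hp]; omega)]
        rw [List.getD_eq_getElem _ _ (by simp [hp]; omega)]
        simp [pvStepG]
      have hpt : ∀ j, j < d.length → b.getD j "" = d.getD j "" ∨
          (d.getD j "" = "." ∧ b.getD j "" ≠ ".") := by
        intro j hj
        by_cases hjk : j < len.toNat
        · rw [hgb j hjk]
          by_cases hA : p.getD j "" = "." ∧ pvScan "R" p j = some 1 ∧ pvOpp "L" p j ≠ some 1
          · right
            refine ⟨by rw [← pv_getD_take d _ j hjk hk]; exact hA.1, ?_⟩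
            rw [pvNewG_t "R" "L" p j hA.1 hA.2.1 hA.2.2]
            decide
          · by_cases hB : p.getD j "" = "." ∧ pvOpp "L" p j = some 1 ∧ pvScan "R" p j ≠ some 1
            · right
              refine ⟨by rw [← pv_getD_take d _ j hjk hk]; exact hB.1, ?_⟩
              rw [pvNewG_u "R" "L" p j hB.1 hB.2.1 hB.2.2]
              decide
            · left
              have : pvNewG "R" "L" p j = p.getD j "" := by
                unfold pvNewG
                rw [if_neg (fun h => hA ⟨h.1, h.2.1, h.2.2⟩),
                  if_neg (fun h => hB ⟨h.1, h.2.1, h.2.2⟩)]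
              rw [this, pv_getD_take d _ j hjk hk]
        · left
          rw [hbdef, List.getD_append_right _ _ _ _ (by simp [hp]; omega)]
          rw [hsdef]
          rw [List.getD_eq_getElem _ _ (by simp [hp]; omega), List.getD_eq_getElem _ _ hj,
            List.getElem_drop]
          congr 1
          simp [hp]
          omega
      have hwit : ∃ j, j < d.length ∧ d.getD j "" = "." ∧ b.getD j "" ≠ "." := by
        obtain ⟨j, hjp, hdot, hcase⟩ := hchg
        have hjk : j < len.toNat := by omega
        refine ⟨j, by omega, by rw [← pv_getD_take d _ j hjk hk]; exact hdot, ?_⟩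
        rw [hgb j hjk]
        rcases hcase with ⟨h1, h2⟩ | ⟨h1, h2⟩
        · rw [pvNewG_t "R" "L" p j hdot h1 h2]; decide
        · rw [pvNewG_u "R" "L" p j hdot h1 h2]; decide
      have hcnt := pv_count_lt d b hblen hpt hwit
      have ihres := ih b len (by omega) (by rw [hblen]; exact hlen)
      rw [ihres]
      have ht : b.take len.toNat = pvStepG "R" "L" p := by
        rw [hbdef]; exact List.take_left' (by simp [hp])
      have hd2 : b.drop len.toNat = s := by
        rw [hbdef]; exact List.drop_left' (by simp [hp])
      rw [ht, hd2, pvB_step]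
    · rw [if_neg (by simpa using hflag)]
      have hst := pv_nochg_stable (d.take len.toNat)
        (fun hc => hflag ((pv_flag_iff d len hlen).2 hc))
      rw [pvB_stable _ hst]
      exact (List.take_append_drop len.toNat d).symm

-- ===== VERDICT (by name: the statement is the Claim_ definition above) =====
theorem get_config_helper_spec : Claim_equal_get_config_helper := by
  intro d len _ hpre
  unfold Pre_get_config_helper at hpre
  unfold Spec_get_config_helper
  unfold get_config_helper
  rw [pvMain (d.count "." + 1) d len (by omega) hpre, pvAlt_eq d len hpre]
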